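-- pv_equiv track=rewrite | github.com/1999AZZAR/calculator | python/python_prime_sequence.py | generate_n_primes
-- ===== SOURCE A (Python) =====
-- def is_prime(n):
--     if n <= 1:
--         return False
--     for i in range(2, int(n**0.5)+1):
--         if n % i == 0:
--             return False
--     return True
--
-- def generate_n_primes(n):
--     primes = []
--     num = 2
--     while len(primes) < n:
--         if is_prime(num):
--             primes.append(num)
--         num += 1
--     return primes
-- ===== SOURCE B (Python) =====
-- def generate_n_primes(n):
--     # Trial-divide each candidate only by the primes already found, stopping
--     # once p*p exceeds the candidate.
--     primes = []
--     candidate = 2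
--     while len(primes) < n:
--         is_p = True
--         for p in primes:
--             if p * p > candidate:
--                 break
--             if candidate % p == 0:
--                 is_p = False
--                 break
--         if is_p:
--             primes.append(candidate)
--         candidate += 1
--     return primes
-- ===== Notes on version B (the rewrite author's own statement) =====
-- stated objective: faster
-- what changed: Instead of testing each candidate against every integer 2..isqrt(candidate), B trial-divides each candidate only by the primes already collected, breaking as soon as p*p exceeds the candidate.
import Mathlib
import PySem

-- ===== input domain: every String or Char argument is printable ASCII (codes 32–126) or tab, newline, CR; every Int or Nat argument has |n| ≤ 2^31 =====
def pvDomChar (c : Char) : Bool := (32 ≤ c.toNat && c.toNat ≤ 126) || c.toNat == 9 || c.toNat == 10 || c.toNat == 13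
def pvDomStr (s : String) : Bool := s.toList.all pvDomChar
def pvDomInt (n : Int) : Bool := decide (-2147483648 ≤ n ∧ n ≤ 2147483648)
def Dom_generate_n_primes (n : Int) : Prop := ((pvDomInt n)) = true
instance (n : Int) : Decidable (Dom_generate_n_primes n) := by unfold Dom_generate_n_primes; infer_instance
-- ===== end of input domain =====

-- B replaces A's per-candidate trial division by all integers 2..isqrt(candidate) with
-- trial division by the already-collected primes, breaking once p*p exceeds the candidate
-- (objective: faster, measured on the timing inputs).

-- ===== PORT A =====
-- is_prime(n): trial division by i = 2 .. int(n**0.5).  `int(n**0.5)` is ported as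
-- Nat.sqrt, exact for every value is_prime is applied to on the admitted domain.
def is_primeA (m : Nat) : Bool :=
  if m ≤ 1 then false
  else (List.range' 2 (Nat.sqrt m + 1 - 2)).all (fun i => decide (m % i ≠ 0))

-- (cited by the port: the while-loop search terminates because primes exist above any bound)
theorem is_primeA_iff (m : Nat) : is_primeA m = true ↔ Nat.Prime m := by
  by_cases h1 : m ≤ 1
  · simp [is_primeA, h1]
    intro hp; exact absurd hp.two_le (by omega)
  · have h2 : 2 ≤ m := by omega
    have hs1 : 0 < Nat.sqrt m := Nat.sqrt_pos.mpr (by omega)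
    rw [Nat.prime_def_le_sqrt]
    simp only [is_primeA, if_neg h1, List.all_eq_true, List.mem_range'_1, decide_eq_true_eq]
    constructor
    · intro h
      exact ⟨h2, fun i hi2 his hdvd =>
        h i ⟨hi2, by omega⟩ (Nat.dvd_iff_mod_eq_zero.mp hdvd)⟩
    · rintro ⟨-, h⟩ i ⟨hi2, hilt⟩ hmod
      exact h i hi2 (by omega) (Nat.dvd_iff_mod_eq_zero.mpr hmod)

theorem nextA_ex (c : Nat) : ∃ j, is_primeA (c + j) = true := by
  obtain ⟨p, hcp, hp⟩ := Nat.exists_infinite_primes c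
  exact ⟨p - c, by rw [Nat.add_sub_cancel' hcp]; exact (is_primeA_iff p).mpr hp⟩

-- the `while` loop steps `num += 1` until is_prime(num); nextA c is the value of `num`
-- at which the next append happens
def nextA (c : Nat) : Nat := c + Nat.find (nextA_ex c)

-- the while loop, counted by the number of primes still missing (n - len(primes))
def goA : Nat → List Nat → Nat → List Nat
  | 0, primes, _ => primes
  | k + 1, primes, c => goA k (primes ++ [nextA c]) (nextA c + 1)

def generate_n_primes (n : Int) : List Int := (goA n.toNat [] 2).map Int.ofNat

-- ===== PORT B =====
-- inner for-loop of Source B: divide only by stored primes, break as soon as p*p > candidate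
def trialB : List Nat → Nat → Bool
  | [], _ => true
  | p :: ps, c => if c < p * p then true else if c % p = 0 then false else trialB ps c

-- (cited by the port: the while-loop search terminates because primes exist above any bound)
theorem trialB_of_prime (primes : List Nat) (c : Nat)
    (h2 : ∀ p ∈ primes, 2 ≤ p) (hc : Nat.Prime c) : trialB primes c = true := by
  induction primes with
  | nil => rfl
  | cons p ps ih =>
    have hp2 : 2 ≤ p := h2 p (by simp)
    by_cases hbr : c < p * p
    · simp [trialB, hbr]
    · have hnd : c % p ≠ 0 := by
        intro h0
        rcases hc.eq_one_or_self_of_dvd p (Nat.dvd_iff_mod_eq_zero.mpr h0) with h | h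
        · omega
        · subst h; nlinarith
      simp only [trialB, if_neg hbr, if_neg hnd]
      exact ih (fun q hq => h2 q (by simp [hq]))

theorem nextB_ex (primes : List Nat) (c : Nat) (h2 : ∀ p ∈ primes, 2 ≤ p) :
    ∃ j, trialB primes (c + j) = true := by
  obtain ⟨p, hcp, hp⟩ := Nat.exists_infinite_primes c
  exact ⟨p - c, by rw [Nat.add_sub_cancel' hcp]; exact trialB_of_prime primes p h2 hp⟩

def nextB (primes : List Nat) (c : Nat) (h2 : ∀ p ∈ primes, 2 ≤ p) : Nat :=
  c + Nat.find (nextB_ex primes c h2)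

def goB : Nat → (primes : List Nat) → (c : Nat) → (∀ p ∈ primes, 2 ≤ p) → 2 ≤ c → List Nat
  | 0, primes, _, _, _ => primes
  | k + 1, primes, c, h2, hc =>
    goB k (primes ++ [nextB primes c h2]) (nextB primes c h2 + 1)
      (by
        intro p hp
        rcases List.mem_append.mp hp with h | h
        · exact h2 p h
        · have he : p = nextB primes c h2 := by simpa using h
          subst he; unfold nextB; omega)
      (by unfold nextB; omega)

def generate_n_primes_alt (n : Int) : List Int :=
  (goB n.toNat [] 2 (by simp) (by norm_num)).map Int.ofNat

-- ===== PRECONDITION & SPEC =====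
def Spec_generate_n_primes (n : Int) (out : List Int) : Prop := out = generate_n_primes_alt n
instance (n : Int) (out : List Int) : Decidable (Spec_generate_n_primes n out) := by unfold Spec_generate_n_primes; infer_instance

-- ===== CLAIM (what is proved, stated in full; the proofs are below) =====
def Claim_equal_generate_n_primes : Prop := ∀ (n : Int), Dom_generate_n_primes n → Spec_generate_n_primes n (generate_n_primes n)

-- ===== LEMMAS AND PROOFS =====

-- loop invariant: primes is the ascending list of exactly the primes below the candidate
def LoopInv (primes : List Nat) (c : Nat) : Prop :=
  List.Pairwise (· < ·) primes ∧ ∀ p, p ∈ primes ↔ (Nat.Prime p ∧ p < c)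

-- scanning an ascending list containing m.minFac, with m.minFac² ≤ m, returns false
theorem trialB_false (m : Nat) (hsq : m.minFac * m.minFac ≤ m) :
    ∀ (primes : List Nat), List.Pairwise (· < ·) primes → (∀ p ∈ primes, 2 ≤ p) →
      m.minFac ∈ primes → trialB primes m = false := by
  intro primes
  induction primes with
  | nil => intro _ _ h; cases h
  | cons p ps ih =>
    intro hsort h2 hmem
    rcases List.mem_cons.mp hmem with heq | hmem'
    · subst heq
      have hbr : ¬ m < m.minFac * m.minFac := by omega
      have hdvd : m % m.minFac = 0 := Nat.dvd_iff_mod_eq_zero.mp (Nat.minFac_dvd m)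
      simp [trialB, hbr, hdvd]
    · have hplt : p < m.minFac := (List.pairwise_cons.mp hsort).1 _ hmem'
      have hp2 : 2 ≤ p := h2 p (by simp)
      have hbr : ¬ m < p * p := by nlinarith
      have hnd : m % p ≠ 0 := by
        intro h0
        have := Nat.minFac_le_of_dvd hp2 (Nat.dvd_iff_mod_eq_zero.mpr h0)
        omega
      simp only [trialB, if_neg hbr, if_neg hnd]
      exact ih (List.pairwise_cons.mp hsort).2 (fun q hq => h2 q (by simp [hq])) hmem'

-- under the invariant the two searches find the same next value of `num`
theorem next_eq (primes : List Nat) (c : Nat) (hc : 2 ≤ c) (hInv : LoopInv primes c)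
    (h2 : ∀ p ∈ primes, 2 ≤ p) : nextA c = nextB primes c h2 := by
  unfold nextA nextB
  congr 1
  have HA := nextA_ex c
  have HB := nextB_ex primes c h2
  apply le_antisymm
  · -- jA ≤ jB : otherwise c + jB would be a non-prime accepted by trialB
    by_contra hlt
    push_neg at hlt
    have hjB : Nat.find HB < Nat.find HA := hlt
    have hBtrue := Nat.find_spec HB
    set m := c + Nat.find HB with hm
    have hnotA : is_primeA m = false := by simpa using Nat.find_min HA hjB
    have hnp : ¬ Nat.Prime m := fun h => by
      rw [(is_primeA_iff m).mpr h] at hnotA; cases hnotA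
    have hm2 : 2 ≤ m := by omega
    have hsq : m.minFac * m.minFac ≤ m := by
      have := Nat.minFac_sq_le_self (by omega) hnp
      rwa [pow_two] at this
    have hfp : Nat.Prime m.minFac := Nat.minFac_prime (by omega)
    have hflt : m.minFac < m := by
      rcases lt_or_eq_of_le (Nat.minFac_le (by omega : 0 < m)) with h | h
      · exact h
      · exact absurd (h ▸ hfp) hnp
    have hfc : m.minFac < c := by
      by_contra hge
      push_neg at hge
      -- m.minFac would be a prime in [c, m), contradicting minimality of Nat.find HA
      have hj : m.minFac - c < Nat.find HA := by omega
      have := Nat.find_min HA hj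
      rw [Nat.add_sub_cancel' hge] at this
      exact this ((is_primeA_iff _).mpr hfp)
    have hmem : m.minFac ∈ primes := (hInv.2 _).mpr ⟨hfp, hfc⟩
    have hfalse := trialB_false m hsq primes hInv.1 h2 hmem
    rw [hBtrue] at hfalse
    cases hfalse
  · -- jB ≤ jA : c + jA is prime, so trialB accepts it
    exact Nat.find_min' HB (trialB_of_prime primes _ h2 ((is_primeA_iff _).mp (Nat.find_spec HA)))

-- characterization of nextA: the least prime ≥ c
theorem nextA_prime (c : Nat) : Nat.Prime (nextA c) :=
  (is_primeA_iff _).mp (Nat.find_spec (nextA_ex c))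

theorem nextA_ge (c : Nat) : c ≤ nextA c := by unfold nextA; omega

theorem nextA_min (c r : Nat) (hcr : c ≤ r) (hr : r < nextA c) : ¬ Nat.Prime r := by
  intro hp
  have hj : r - c < Nat.find (nextA_ex c) := by unfold nextA at hr; omega
  have := Nat.find_min (nextA_ex c) hj
  rw [Nat.add_sub_cancel' hcr] at this
  exact this ((is_primeA_iff _).mpr hp)

-- the invariant is preserved by appending the next prime
theorem LoopInv_step (primes : List Nat) (c : Nat) (hInv : LoopInv primes c) :
    LoopInv (primes ++ [nextA c]) (nextA c + 1) := by
  constructor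
  · rw [List.pairwise_append]
    refine ⟨hInv.1, by simp, fun a ha b hb => ?_⟩
    have hb' : b = nextA c := by simpa using hb
    have h1 := ((hInv.2 a).mp ha).2
    have h2 := nextA_ge c
    omega
  · intro p
    rw [List.mem_append, hInv.2 p]
    constructor
    · rintro (⟨hp, hlt⟩ | hmem)
      · exact ⟨hp, by have := nextA_ge c; omega⟩
      · have he : p = nextA c := by simpa using hmem
        subst he; exact ⟨nextA_prime c, by omega⟩
    · rintro ⟨hp, hlt⟩
      by_cases h : p < c
      · exact Or.inl ⟨hp, h⟩
      · push_neg at h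
        right
        have he : p = nextA c := by
          by_contra hne
          exact nextA_min c p h (by omega) hp
        simp [he]

theorem go_eq (k : Nat) : ∀ (primes : List Nat) (c : Nat) (h2 : ∀ p ∈ primes, 2 ≤ p)
    (hc : 2 ≤ c), LoopInv primes c → goA k primes c = goB k primes c h2 hc := by
  induction k with
  | zero => intro primes c h2 hc _; rfl
  | succ k ih =>
    intro primes c h2 hc hInv
    have hnext : nextA c = nextB primes c h2 := next_eq primes c hc hInv h2
    have hInv' := LoopInv_step primes c hInv
    rw [hnext] at hInv'
    show goA k (primes ++ [nextA c]) (nextA c + 1) = goB (k + 1) primes c h2 hc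
    rw [hnext]
    exact ih (primes ++ [nextB primes c h2]) (nextB primes c h2 + 1)
      (by
        intro p hp
        rcases List.mem_append.mp hp with h | h
        · exact h2 p h
        · have he : p = nextB primes c h2 := by simpa using h
          subst he; unfold nextB; omega)
      (by unfold nextB; omega) hInv'

theorem LoopInv_init : LoopInv [] 2 := by
  refine ⟨List.Pairwise.nil, fun p => ?_⟩
  simp only [List.not_mem_nil, false_iff, not_and]
  intro hp
  have := hp.two_le
  omega

-- ===== VERDICT (by name: the statement is the Claim_ definition above) =====
theorem generate_n_primes_spec : Claim_equal_generate_n_primes := by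
  intro n _
  unfold Spec_generate_n_primes generate_n_primes generate_n_primes_alt
  exact congrArg (List.map Int.ofNat)
    (go_eq n.toNat [] 2 (by simp) (by norm_num) LoopInv_init)
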